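-- pv_equiv track=rewrite | github.com/tjkreutz/master-thesis | src/features.py | tagged_words
-- ===== SOURCE A (Python) =====
-- def tagged_words(x):
--     record = False
--     tokens = x.split()
--     vec = [0, 0, 0, 0, 0, 0, 0, 0]
--     tag_words = ['verdachte', 'nummer', 'naam', 'bedrijf', 'adres', 'slachtoffer', 'aangever', 'kenteken']
--     for token in tokens:
--         if record == True:
--             token = token.strip().lower()
--             if token in tag_words:
--                 vec[tag_words.index(token)] += 1
--             record = False
--         if token == '[':
--             record = True
--
--     return vec
-- ===== SOURCE B (Python) =====
-- def tagged_words(x):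
--     tokens = x.split()
--     tag_words = ['verdachte', 'nummer', 'naam', 'bedrijf', 'adres', 'slachtoffer', 'aangever', 'kenteken']
--     followers = [tokens[i + 1].strip().lower()
--                  for i in range(len(tokens) - 1) if tokens[i] == '[']
--     return [followers.count(w) for w in tag_words]
-- ===== Notes on version B (the rewrite author's own statement) =====
-- stated objective: alternative
-- what changed: Replaces A's single-pass mutable state machine (record flag + in-place vector increments) by a staged pipeline: first collect the normalized tokens that follow each '[' into a list, then build the output vector per tag word with followers.count(w), so no flag and no mutable vector exist.
import Mathlib
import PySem

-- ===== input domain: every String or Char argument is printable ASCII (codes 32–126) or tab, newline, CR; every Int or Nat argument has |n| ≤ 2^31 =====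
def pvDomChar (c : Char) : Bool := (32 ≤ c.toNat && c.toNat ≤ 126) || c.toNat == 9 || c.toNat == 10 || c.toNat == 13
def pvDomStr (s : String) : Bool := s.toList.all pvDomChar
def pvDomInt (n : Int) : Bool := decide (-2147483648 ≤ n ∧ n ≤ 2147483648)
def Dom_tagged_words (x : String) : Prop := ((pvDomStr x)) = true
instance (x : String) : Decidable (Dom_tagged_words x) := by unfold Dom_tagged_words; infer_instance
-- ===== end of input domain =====

-- B replaces A's mutable record-flag state machine by a staged pipeline: collect the
-- normalized tokens following each '[', then build the vector by counting per tag word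
-- (objective: alternative decomposition, same cost).

-- ===== PORT A =====
def twTagWords : List String :=
  ["verdachte", "nummer", "naam", "bedrijf", "adres", "slachtoffer", "aangever", "kenteken"]

-- loop body of A: state = (record, vec); twBumpA is A's `vec[tag_words.index(token)] += 1` block
def twBumpA (w : String) (vec : List Int) : List Int :=
  if twTagWords.contains w then
    let k : Nat := (PySem.List.index? twTagWords w).getD 0
    PySem.List.pySetD vec (k : Int) (PySem.List.pyGetD vec (k : Int) 0 + 1)
  else vec

def twStepA (s : Bool × List Int) (token : String) : Bool × List Int :=
  if s.1 then
    let token := PySem.Str.lower (PySem.Str.strip token)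
    (token == "[", twBumpA token s.2)
  else
    (token == "[", s.2)

def tagged_words (x : String) : List Int :=
  let tokens := PySem.Str.split₀ x
  (tokens.foldl twStepA (false, [0, 0, 0, 0, 0, 0, 0, 0])).2

-- ===== PORT B =====
-- B's list comprehension over range(len(tokens)-1); indices i and i+1 are always in
-- range, so getD is exact here.
def tagged_words_alt (x : String) : List Int :=
  let tokens := PySem.Str.split₀ x
  let followers := (List.range (tokens.length - 1)).filterMap (fun i =>
    if tokens.getD i "" == "[" then
      some (PySem.Str.lower (PySem.Str.strip (tokens.getD (i + 1) ""))) else none)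
  twTagWords.map (fun w => (PySem.List.count followers w : Int))

-- ===== PRECONDITION & SPEC =====
def Spec_tagged_words (x : String) (out : List Int) : Prop := out = tagged_words_alt x
instance (x : String) (out : List Int) : Decidable (Spec_tagged_words x out) := by unfold Spec_tagged_words; infer_instance

-- ===== CLAIM =====
def Claim_equal_tagged_words : Prop := ∀ (x : String), Dom_tagged_words x → Spec_tagged_words x (tagged_words x)

-- ===== LEMMAS AND PROOFS =====

-- the normalized tokens recorded by A, as a function of the flag and the token list
def twFolB : Bool → List String → List String
  | _, [] => []
  | b, t :: rest =>
    (if b then [PySem.Str.lower (PySem.Str.strip t)] else []) ++ twFolB (t == "[") rest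

-- the same list described structurally over adjacent pairs
def twFol : List String → List String
  | a :: b :: rest =>
    (if a == "[" then [PySem.Str.lower (PySem.Str.strip b)] else []) ++ twFol (b :: rest)
  | _ => []

-- a "good" token: only the literal "[" normalises to "[" (true of whitespace-free tokens)
def twGood (t : String) : Prop := PySem.Str.lower (PySem.Str.strip t) = "[" → t = "["

-- every token produced by split() is whitespace-free
theorem twGo_nonspace (s cur : List Char) (acc : List (List Char))
    (hc : ∀ c ∈ cur, PySem.Chars.isspace c = false)
    (ha : ∀ u ∈ acc, ∀ c ∈ u, PySem.Chars.isspace c = false) :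
    ∀ u ∈ PySem.Chars.split₀.go s cur acc, ∀ c ∈ u, PySem.Chars.isspace c = false := by
  induction s generalizing cur acc with
  | nil =>
    intro u hu
    simp only [PySem.Chars.split₀.go] at hu
    split at hu
    · simp only [List.mem_reverse] at hu; exact ha u hu
    · simp only [List.mem_reverse, List.mem_cons] at hu
      rcases hu with h | h
      · subst h; intro c hc'; exact hc c (List.mem_reverse.mp hc')
      · exact ha u h
  | cons c rest ih =>
    intro u hu
    simp only [PySem.Chars.split₀.go] at hu
    split at hu
    · split at hu
      · exact ih [] acc (by simp) ha u hu
      · refine ih [] (cur.reverse :: acc) (by simp) ?_ u hu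
        intro v hv
        rcases List.mem_cons.mp hv with h | h
        · subst h; intro d hd; exact hc d (List.mem_reverse.mp hd)
        · exact ha v h
    · rename_i hsp
      refine ih (c :: cur) acc ?_ ha u hu
      intro d hd
      rcases List.mem_cons.mp hd with h | h
      · subst h; simpa using hsp
      · exact hc d h

theorem twLowerChar_eq_lbrack {c : Char} (h : PySem.Chars.lowerChar c = '[') : c = '[' := by
  unfold PySem.Chars.lowerChar at h
  split at h
  · rename_i hu
    unfold PySem.Chars.isupper at hu
    simp only [Bool.and_eq_true, decide_eq_true_eq, Char.le_def] at hu
    have h1 : 65 ≤ c.toNat := by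
      have := UInt32.le_iff_toNat_le.mp hu.1; simpa using this
    have h2 : c.toNat ≤ 90 := by
      have := UInt32.le_iff_toNat_le.mp hu.2; simpa using this
    have h91 : (Char.ofNat (c.toNat + 32)).toNat = 91 := by rw [h]; rfl
    rw [Char.toNat_ofNat] at h91
    rw [if_pos (by left; omega : Nat.isValidChar (c.toNat + 32))] at h91
    omega
  · exact h

theorem twDropWhile_self (l : List Char) (hl : ∀ c ∈ l, PySem.Chars.isspace c = false) :
    l.dropWhile PySem.Chars.isspace = l := by
  cases l with
  | nil => rfl
  | cons a l => simp [hl a (List.mem_cons_self)]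

theorem twGood_of_nonspace (t : String)
    (h : ∀ c ∈ t.toList, PySem.Chars.isspace c = false) : twGood t := by
  intro heq
  have hl : (PySem.Str.lower (PySem.Str.strip t)).toList = "[".toList := by rw [heq]
  rw [PySem.Str.toList_lower, PySem.Str.toList_strip] at hl
  have hstrip : PySem.Chars.strip t.toList = t.toList := by
    unfold PySem.Chars.strip PySem.Chars.lstrip PySem.Chars.rstrip
    rw [twDropWhile_self _ h, twDropWhile_self, List.reverse_reverse]
    intro c hc
    exact h c (List.mem_reverse.mp hc)
  rw [hstrip] at hl
  unfold PySem.Chars.lower at hl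
  apply String.toList_inj.mp
  show t.toList = "[".toList
  cases ht : t.toList with
  | nil => rw [ht] at hl; simp at hl
  | cons a l =>
    rw [ht] at hl
    cases l with
    | nil =>
      simp only [List.map_cons, List.map_nil, show ("[" : String).toList = ['['] from rfl,
        List.cons.injEq, and_true] at hl
      rw [twLowerChar_eq_lbrack hl]
      rfl
    | cons b l' =>
      rw [show ("[" : String).toList = ['['] from rfl] at hl
      simp at hl

theorem twTokens_good (x : String) : ∀ t ∈ PySem.Str.split₀ x, twGood t := by
  intro t ht
  unfold PySem.Str.split₀ at ht
  rcases List.mem_map.mp ht with ⟨cs, hcs, rfl⟩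
  apply twGood_of_nonspace
  have hcs' : cs ∈ PySem.Chars.split₀.go x.toList [] [] := hcs
  have hns := twGo_nonspace x.toList [] [] (by simp) (by simp) cs hcs'
  intro c hc
  exact hns c (by simpa using hc)

-- A's fold equals the bump-fold over the recorded followers
theorem twA_run (ts : List String) (hg : ∀ t ∈ ts, twGood t) (b : Bool) (vec : List Int) :
    (ts.foldl twStepA (b, vec)).2
      = (twFolB b ts).foldl (fun v w => twBumpA w v) vec := by
  induction ts generalizing b vec with
  | nil => rfl
  | cons t rest ih =>
    have hgt := hg t (by simp)
    have hrest : ∀ u ∈ rest, twGood u := fun u hu => hg u (by simp [hu])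
    cases b with
    | false =>
      have hstep : twStepA (false, vec) t = (t == "[", vec) := by
        simp [twStepA]
      rw [List.foldl_cons, hstep, twFolB, if_neg (by simp), List.nil_append]
      exact ih hrest (t == "[") vec
    | true =>
      have hflag : (PySem.Str.lower (PySem.Str.strip t) == "[") = (t == "[") := by
        by_cases ht : t = "["
        · subst ht; decide
        · have : PySem.Str.lower (PySem.Str.strip t) ≠ "[" := fun h => ht (hgt h)
          simp [ht, this]
      have hstep : twStepA (true, vec) t
          = (t == "[", twBumpA (PySem.Str.lower (PySem.Str.strip t)) vec) := by
        simp [twStepA, hflag]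
      rw [List.foldl_cons, hstep, twFolB, if_pos rfl, List.singleton_append, List.foldl_cons]
      exact ih hrest (t == "[") (twBumpA (PySem.Str.lower (PySem.Str.strip t)) vec)

-- with the flag initially off, the recorded followers are exactly the pairwise ones
theorem twFolB_false (ts : List String) : twFolB false ts = twFol ts := by
  induction ts with
  | nil => rfl
  | cons a rest ih =>
    cases rest with
    | nil => rfl
    | cons b r =>
      have ih' : twFolB (b == "[") r = twFol (b :: r) := by
        simpa [twFolB] using ih
      simp [twFolB, twFol, ih']

-- B's index-based comprehension computes the pairwise follower list
theorem twB_followers (ts : List String) :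
    (List.range (ts.length - 1)).filterMap (fun i =>
      if ts.getD i "" == "[" then
        some (PySem.Str.lower (PySem.Str.strip (ts.getD (i + 1) ""))) else none)
      = twFol ts := by
  induction ts with
  | nil => rfl
  | cons a rest ih =>
    cases rest with
    | nil => rfl
    | cons b r =>
      have hlen : (a :: b :: r).length - 1 = r.length + 1 := by simp
      rw [hlen, List.range_succ_eq_map, List.filterMap_cons, List.filterMap_map]
      have hshift : ((fun i => if (a :: b :: r).getD i "" == "[" then
            some (PySem.Str.lower (PySem.Str.strip ((a :: b :: r).getD (i + 1) ""))) else none)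
          ∘ (fun i => i + 1))
          = (fun i => if (b :: r).getD i "" == "[" then
            some (PySem.Str.lower (PySem.Str.strip ((b :: r).getD (i + 1) ""))) else none) := by
        funext i; rfl
      rw [hshift]
      have hr : (b :: r).length - 1 = r.length := by simp
      have ih' := ih
      rw [hr] at ih'
      by_cases ha : a = "["
      · subst ha
        simp only [twFol, if_pos (by decide : (("[" : String) == "[") = true)]
        simpa [ih'] using congrArg (List.cons (PySem.Str.lower (PySem.Str.strip b))) ih'
      · have hb : (a == "[") = false := by simp [ha]
        simp only [List.getD_cons_zero, hb, twFol]
        simpa [hb] using ih'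

-- setting position k (= the index of w) of a tabulation of g tabulates g plus one at w
theorem twSet_tab (l : List String) (hn : l.Nodup) (g : String → Int) (w : String) (k : Nat)
    (hk : PySem.List.index? l w = some k) :
    (l.map g).set k (g w + 1) = l.map (fun w' => g w' + if w' == w then 1 else 0) := by
  induction l generalizing k with
  | nil => simp [PySem.List.index?] at hk
  | cons a l ih =>
    by_cases ha : a = w
    · subst ha
      rw [PySem.List.index?_cons_self] at hk
      obtain rfl : k = 0 := by simpa using hk.symm
      have hw : a ∉ l := (List.nodup_cons.mp hn).1
      simp only [List.map_cons, List.set_cons_zero, beq_self_eq_true, if_true]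
      congr 1
      refine (List.map_congr_left ?_).symm
      intro w' hw'
      have : (w' == a) = false := by
        simp only [beq_eq_false_iff_ne, ne_eq]
        rintro rfl; exact hw hw'
      simp [this]
    · rw [PySem.List.index?_cons_of_ne l ha] at hk
      obtain ⟨k', hk', rfl⟩ := Option.map_eq_some_iff.mp hk
      have hhead : (a == w) = false := by simp [ha]
      simp only [List.map_cons, List.set_cons_succ, hhead, Bool.false_eq_true, if_false,
        add_zero]
      congr 1
      exact ih (List.nodup_cons.mp hn).2 k' hk'

-- bumping a vector that is a tabulation of g tabulates g plus one at w
theorem twBump_map (g : String → Int) (w : String) :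
    twBumpA w (twTagWords.map g)
      = twTagWords.map (fun w' => g w' + if w' == w then 1 else 0) := by
  by_cases hm : w ∈ twTagWords
  · obtain ⟨k, hk⟩ := Option.isSome_iff_exists.mp
      ((PySem.List.index?_isSome_iff twTagWords w).mpr hm)
    obtain ⟨hklt, hgetk, -⟩ := PySem.List.getElem_of_index?_eq_some hk
    rw [twBumpA, if_pos (by simpa using hm), hk]
    simp only [Option.getD_some, PySem.List.pySetD_natCast, PySem.List.pyGetD_natCast]
    have hget : (twTagWords.map g).getD k 0 = g w := by
      rw [List.getD_eq_getElem _ _ (by simpa using hklt)]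
      simp [hgetk]
    rw [hget]
    exact twSet_tab twTagWords (by decide) g w k hk
  · have h2 : ∀ w' ∈ twTagWords, (w' == w) = false := by
      intro w' hw'
      simp only [beq_eq_false_iff_ne, ne_eq]
      rintro rfl; exact hm hw'
    rw [twBumpA, if_neg (by simpa using hm)]
    refine (List.map_congr_left ?_).symm
    intro w' hw'
    simp [h2 w' hw']

-- the bump-fold over ws tabulates counts of ws over the tag words
theorem twFold_count (ws : List String) (g : String → Int) :
    ws.foldl (fun v w => twBumpA w v) (twTagWords.map g)
      = twTagWords.map (fun w' => g w' + (ws.count w' : Int)) := by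
  induction ws generalizing g with
  | nil =>
    refine (List.map_congr_left ?_).symm
    intro w' _
    simp
  | cons w ws ih =>
    simp only [List.foldl_cons]
    rw [twBump_map g w, ih]
    refine List.map_congr_left ?_
    intro w' _
    rw [List.count_cons]
    by_cases h : w = w'
    · subst h
      simp only [beq_self_eq_true, if_true]
      push_cast
      ring
    · have h1 : (w' == w) = false := by simp [Ne.symm h]
      have h2 : (w == w') = false := by simp [h]
      simp only [h1, h2, Bool.false_eq_true, if_false]
      push_cast
      ring

-- ===== VERDICT =====
theorem tagged_words_spec : Claim_equal_tagged_words := by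
  intro x _
  unfold Spec_tagged_words tagged_words tagged_words_alt
  simp only []
  rw [twA_run (PySem.Str.split₀ x) (twTokens_good x) false [0, 0, 0, 0, 0, 0, 0, 0],
    twFolB_false, twB_followers]
  have h0 : ([0, 0, 0, 0, 0, 0, 0, 0] : List Int) = twTagWords.map (fun _ => (0 : Int)) := by
    decide
  rw [h0, twFold_count]
  refine (List.map_congr_left ?_).symm
  intro w _
  simp [PySem.List.count_eq]
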